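-- pv_equiv track=rewrite | github.com/Tulip4attoo/coding-dojo | project_euler/p132.py | check_devided
-- ===== SOURCE A (Python) =====
-- def check_devided(p):
--     """
--
--     """
--     power_of_power = 9
--     mod = 10
--     for i in range(power_of_power):
--         mod = mod ** 10 % p
--     if mod % p == 1:
--         return True
--     else:
--         return False
-- ===== SOURCE B (Python) =====
-- def check_devided(p):
--     result = 1
--     base = 10 % p
--     exp = 10 ** 9
--     while exp > 0:
--         if exp & 1:
--             result = result * base % p
--         base = base * base % p
--         exp >>= 1
--     return result == 1
-- ===== Notes on version B (the rewrite author's own statement) =====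
-- stated objective: alternative
-- what changed: Replaced the fixed nine-iteration loop of modular tenth powers with square-and-multiply binary exponentiation computing 10**(10**9) % p.
import Mathlib
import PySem

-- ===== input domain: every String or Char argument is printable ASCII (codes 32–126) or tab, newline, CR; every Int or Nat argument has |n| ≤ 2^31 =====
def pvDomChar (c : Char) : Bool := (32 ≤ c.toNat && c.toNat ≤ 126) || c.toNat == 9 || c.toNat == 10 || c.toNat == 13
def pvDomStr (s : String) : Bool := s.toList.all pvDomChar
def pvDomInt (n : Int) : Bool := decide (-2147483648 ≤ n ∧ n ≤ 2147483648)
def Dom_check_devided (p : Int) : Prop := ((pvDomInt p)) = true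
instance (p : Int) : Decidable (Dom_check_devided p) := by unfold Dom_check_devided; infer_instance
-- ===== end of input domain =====

-- B replaces A's nine-fold repeated tenth-powering with binary (square-and-multiply)
-- modular exponentiation of 10^(10^9) mod p; objective: alternative decomposition.


-- ===== PORT A =====
def check_devided (p : Int) : Bool :=
  -- power_of_power = 9; mod = 10; for i in range(power_of_power): mod = mod ** 10 % p
  let mod := (PySem.List.pyRange 0 9 1).foldl (fun mod _i => PySem.Int.mod (mod ^ (10 : Nat)) p) 10
  -- if mod % p == 1: return True else: return False
  decide (PySem.Int.mod mod p = 1)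

-- ===== PORT B =====
-- while exp > 0: if exp & 1: result = result * base % p; base = base * base % p; exp >>= 1
def bexpLoop (p result base : Int) (exp : Nat) : Int :=
  if exp = 0 then result
  else
    bexpLoop p (if exp % 2 = 1 then PySem.Int.mod (result * base) p else result)
      (PySem.Int.mod (base * base) p) (exp / 2)
termination_by exp
decreasing_by omega

def check_devided_alt (p : Int) : Bool :=
  decide (bexpLoop p 1 (PySem.Int.mod 10 p) (10 ^ 9 : Nat) = 1)

-- ===== PRECONDITION & SPEC =====
-- Pre_ excludes exactly p = 0, where Python's '%' raises ZeroDivisionError.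
def Pre_check_devided (p : Int) : Prop := p ≠ 0
instance (p : Int) : Decidable (Pre_check_devided p) := by unfold Pre_check_devided; infer_instance
def pvWitness_check_devided : Int := (7)

def Spec_check_devided (p : Int) (out : Bool) : Prop := out = check_devided_alt p
instance (p : Int) (out : Bool) : Decidable (Spec_check_devided p out) := by unfold Spec_check_devided; infer_instance

-- ===== CLAIM (what is proved, stated in full; the proofs are below) =====
def Claim_equal_check_devided : Prop := ∀ (p : Int), Dom_check_devided p → Pre_check_devided p → Spec_check_devided p (check_devided p)

-- ===== LEMMAS AND PROOFS =====

-- reducing the base of a power before an fmod does not change the fmod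
lemma pow_fmod (x p : Int) (k : Nat) : ((x.fmod p) ^ k).fmod p = (x ^ k).fmod p := by
  induction k with
  | zero => simp
  | succ n ih =>
    rw [pow_succ, pow_succ, Int.mul_fmod, ih, Int.fmod_fmod, ← Int.mul_fmod]

-- reducing either factor before an fmod does not change the fmod
lemma mul_fmod_left' (x z p : Int) : ((x.fmod p) * z).fmod p = (x * z).fmod p := by
  rw [Int.mul_fmod, Int.fmod_fmod, ← Int.mul_fmod]

lemma mul_pow_fmod (x y p : Int) (k : Nat) :
    (x * (y.fmod p) ^ k).fmod p = (x * y ^ k).fmod p := by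
  rw [Int.mul_fmod, pow_fmod, ← Int.mul_fmod]

-- invariant of B's square-and-multiply loop
lemma bexpLoop_spec (p : Int) : ∀ e r b, 0 < e → bexpLoop p r b e = (r * b ^ e).fmod p := by
  intro e
  induction e using Nat.strong_induction_on with
  | _ e ih =>
    intro r b he
    rw [bexpLoop]
    simp only [Nat.pos_iff_ne_zero.mp he, if_false]
    by_cases h2 : e / 2 = 0
    · have he1 : e = 1 := by omega
      subst he1
      rw [bexpLoop]
      simp [PySem.Int.mod]
    · rw [ih (e / 2) (by omega) _ _ (by omega)]
      simp only [PySem.Int.mod]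
      rw [mul_pow_fmod, show b * b = b ^ 2 from (sq b).symm, ← pow_mul]
      rcases Nat.even_or_odd e with he2 | he2
      · have : e % 2 = 0 := Nat.even_iff.mp he2
        rw [if_neg (by omega), show 2 * (e / 2) = e by omega]
      · have h1 : e % 2 = 1 := Nat.odd_iff.mp he2
        rw [if_pos h1, mul_fmod_left', mul_assoc, ← pow_succ',
          show 2 * (e / 2) + 1 = e by omega]

-- B computes 10^(10^9) mod p
lemma alt_eq (p : Int) : check_devided_alt p = decide (((10 : Int) ^ (10 ^ 9 : Nat)).fmod p = 1) := by
  unfold check_devided_alt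
  rw [bexpLoop_spec p _ _ _ (by norm_num)]
  simp [PySem.Int.mod, pow_fmod]

-- A computes 10^(10^9) mod p as well
lemma a_eq (p : Int) : check_devided p = decide (((10 : Int) ^ (10 ^ 9 : Nat)).fmod p = 1) := by
  unfold check_devided
  have hr : PySem.List.pyRange 0 9 1 = [0, 1, 2, 3, 4, 5, 6, 7, 8] := by decide
  rw [hr]
  simp only [List.foldl, PySem.Int.mod, pow_fmod, Int.fmod_fmod, ← pow_mul]
  norm_num

-- ===== VERDICT (by name: the statement is the Claim_ definition above) =====
theorem check_devided_spec : Claim_equal_check_devided := by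
  intro p _ _
  unfold Spec_check_devided
  rw [a_eq, alt_eq]
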